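-- pv_equiv track=rewrite | github.com/tianzheng-zhou/mdfy | mdfy/postprocess.py | _fix_unclosed_comments
-- ===== SOURCE A (Python) =====
-- def _fix_unclosed_comments(text):
--     """修复未闭合的 HTML 注释（OCR 产出的注释可能缺少 -->）。"""
--     lines = text.split('\n')
--     in_comment = False
--     for i, line in enumerate(lines):
--         if '<!--' in line and '-->' not in line:
--             in_comment = True
--             # 找到注释起始行，查看后续行是否有 -->
--             # 如果下一个非空行不含 -->，就在当前行末尾补上
--             found_close = False
--             for j in range(i + 1, min(i + 4, len(lines))):
--                 if '-->' in lines[j]: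
--                     found_close = True
--                     break
--             if not found_close:
--                 lines[i] = line + ' -->'
--                 in_comment = False
--     return '\n'.join(lines)
-- ===== SOURCE B (Python) =====
-- def _fix_unclosed_comments(text):
--     """Single backward pass: carry the distance to the nearest following line
--     containing '-->' instead of re-scanning a 3-line window per opener."""
--     lines = text.split('\n')
--     out = []
--     dist = None  # distance to the nearest following line containing '-->'
--     for line in reversed(lines):
--         if '<!--' in line and '-->' not in line and (dist is None or dist > 3):
--             out.append(line + ' -->')
--         else:
--             out.append(line)
--         if '-->' in line:
--             dist = 1
--         elif dist is not None:
--             dist += 1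
--     out.reverse()
--     return '\n'.join(out)
-- ===== Notes on version B (the rewrite author's own statement) =====
-- stated objective: alternative
-- what changed: B replaces A's per-opener forward rescan of the next-3-lines window with a single backward pass over the lines that carries the distance to the nearest following line containing the comment-closing marker, deciding each line in O(1) from that state.
import Mathlib
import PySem

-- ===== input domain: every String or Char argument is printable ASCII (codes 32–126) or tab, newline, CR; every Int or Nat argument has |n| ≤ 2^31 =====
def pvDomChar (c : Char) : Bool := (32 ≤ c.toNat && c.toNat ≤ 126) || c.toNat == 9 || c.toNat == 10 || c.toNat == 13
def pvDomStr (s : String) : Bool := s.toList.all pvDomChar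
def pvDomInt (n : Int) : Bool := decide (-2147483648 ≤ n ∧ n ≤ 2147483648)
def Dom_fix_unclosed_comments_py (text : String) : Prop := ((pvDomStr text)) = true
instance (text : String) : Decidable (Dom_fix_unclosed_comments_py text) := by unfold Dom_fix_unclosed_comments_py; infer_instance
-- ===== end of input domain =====

-- B replaces A's per-opener 3-line forward rescans with a single backward pass that
-- carries the distance to the nearest following line containing '-->' (alternative
-- decomposition; same return value). A's dead `in_comment` flag is dropped.

-- ===== PORT A =====
-- literal transliteration of _fix_unclosed_comments (the inner `for j … break`
-- loop computes existence of '-->' in the window, ported as `.any` over the range)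
def fix_unclosed_comments_py (text : String) : String :=
  let lines := (PySem.Str.split? text "\n").getD []
  let lines := (List.range lines.length).foldl (fun (ls : List String) (i : Nat) =>
    let line := ls.getD i ""
    if PySem.Str.isIn "<!--" line && !(PySem.Str.isIn "-->" line) then
      let found_close :=
        (PySem.List.pyRange ((i : Int) + 1) (min ((i : Int) + 4) (ls.length : Int)) 1).any
          (fun j => PySem.Str.isIn "-->" (PySem.List.pyGetD ls j ""))
      if !found_close then PySem.List.pySetD ls (i : Int) (line ++ " -->") else ls
    else ls) lines
  PySem.Str.join "\n" lines

-- ===== PORT B =====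
-- transliteration of Source B: fold over reversed(lines) carrying (out, dist),
-- then reverse out and join
def fix_unclosed_comments_py_alt (text : String) : String :=
  let lines := (PySem.Str.split? text "\n").getD []
  let acc := lines.reverse.foldl (fun (acc : List String × Option Int) line =>
      let out :=
        if PySem.Str.isIn "<!--" line && !(PySem.Str.isIn "-->" line) &&
            (match acc.2 with | none => true | some d => decide (3 < d)) then
          acc.1 ++ [line ++ " -->"]
        else
          acc.1 ++ [line]
      let dist : Option Int :=
        if PySem.Str.isIn "-->" line then some 1
        else match acc.2 with | none => none | some d => some (d + 1)
      (out, dist)) (([] : List String), (none : Option Int))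
  PySem.Str.join "\n" acc.1.reverse

-- ===== PRECONDITION & SPEC =====
def Spec_fix_unclosed_comments_py (text : String) (out : String) : Prop := out = fix_unclosed_comments_py_alt text
instance (text : String) (out : String) : Decidable (Spec_fix_unclosed_comments_py text out) := by unfold Spec_fix_unclosed_comments_py; infer_instance

-- ===== CLAIM (what is proved, stated in full; the proofs are below) =====
def Claim_equal_fix_unclosed_comments_py : Prop := ∀ (text : String), Dom_fix_unclosed_comments_py text → Spec_fix_unclosed_comments_py text (fix_unclosed_comments_py text)

-- ===== LEMMAS AND PROOFS =====

/-- `'-->' in line` -/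
def pvClose (l : String) : Bool := PySem.Str.isIn "-->" l

/-- `'<!--' in line and '-->' not in line` -/
def pvOpen (l : String) : Bool := PySem.Str.isIn "<!--" l && !pvClose l

/-- decision for one line given its (original) tail -/
def pvDec (l : String) (t : List String) : String :=
  if pvOpen l && !((t.take 3).any pvClose) then l ++ " -->" else l

/-- the common specification: per-line decision with the window over the original tail -/
def pvSpec : List String → List String
  | [] => []
  | l :: t => pvDec l t :: pvSpec t

/-- B's `dist` as a function of the (original) tail -/
def pvDist : List String → Option Int
  | [] => none
  | l :: t => if pvClose l then some 1 else
      match pvDist t with | none => none | some d => some (d + 1)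

theorem pvSpec_length (ls : List String) : (pvSpec ls).length = ls.length := by
  induction ls with
  | nil => rfl
  | cons l t ih => simp [pvSpec, ih]

theorem pvDist_pos (t : List String) (d : Int) (h : pvDist t = some d) : 1 ≤ d := by
  induction t generalizing d with
  | nil => simp [pvDist] at h
  | cons l t ih =>
    simp only [pvDist] at h
    by_cases hc : pvClose l
    · simp [hc] at h; omega
    · simp [hc] at h
      cases ht : pvDist t with
      | none => simp [ht] at h
      | some e => simp [ht] at h; have := ih e ht; omega

theorem pvDist_window (t : List String) (k : Nat) :
    (match pvDist t with | none => true | some d => decide ((k : Int) < d)) =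
      !((t.take k).any pvClose) := by
  induction t generalizing k with
  | nil => simp [pvDist]
  | cons l t ih =>
    by_cases hc : pvClose l
    · simp only [pvDist, if_pos hc]
      cases k with
      | zero => simp
      | succ n => simp [hc]
    · simp only [pvDist, if_neg hc]
      cases k with
      | zero =>
        cases ht : pvDist t with
        | none => simp
        | some d => have := pvDist_pos t d ht; simp; omega
      | succ n =>
        have hgen := ih n
        cases ht : pvDist t with
        | none =>
          simp [ht] at hgen
          simpa [hc] using hgen
        | some d =>
          simp [ht] at hgen
          simp only [hc, List.take_succ_cons, List.any_cons, Bool.not_or, ← hgen]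
          simp only [Bool.not_false, Bool.true_and]
          rw [decide_eq_decide]
          push_cast
          omega

/-- the inner `any` over the Python range equals `any` over a take-3 of the drop -/
theorem pvRange_any (ls : List String) (i : Nat) :
    ((PySem.List.pyRange ((i : Int) + 1) (min ((i : Int) + 4) (ls.length : Int)) 1).any
        (fun j => PySem.Str.isIn "-->" (PySem.List.pyGetD ls j ""))) =
      ((ls.drop (i + 1)).take 3).any pvClose := by
  rcases Bool.eq_false_or_eq_true (((ls.drop (i + 1)).take 3).any pvClose) with hr | hr <;> rw [hr]
  · rw [List.any_eq_true] at hr ⊢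
    obtain ⟨x, hx, hcx⟩ := hr
    rw [List.mem_iff_getElem] at hx
    obtain ⟨k, hk, hget⟩ := hx
    have hk3 : k < 3 := lt_of_lt_of_le hk (by simp)
    have hkd : k < ls.length - (i + 1) := by
      have h1 := hk; simp at h1; omega
    refine ⟨((i + 1 + k : Nat) : Int), ?_, ?_⟩
    · rw [PySem.List.mem_pyRange_one]
      refine ⟨by push_cast; omega, ?_⟩
      refine lt_min (by push_cast; omega) (by push_cast; omega)
    · rw [PySem.List.pyGetD_eq_getElem ls "" (by exact Int.natCast_nonneg _) (by push_cast; omega)]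
      rw [List.getElem_take, List.getElem_drop] at hget
      have hkn : ((i : Int) + 1 + (k : Int)).toNat = i + 1 + k := by omega
      simp only [pvClose] at hcx
      simpa [hkn, hget] using hcx
  · rw [List.any_eq_false]
    intro j hj
    rw [PySem.List.mem_pyRange_one] at hj
    obtain ⟨h1, h2⟩ := hj
    have hlt : j < (ls.length : Int) := lt_of_lt_of_le h2 (min_le_right _ _)
    have hlt4 : j < (i : Int) + 4 := lt_of_lt_of_le h2 (min_le_left _ _)
    rw [List.any_eq_false] at hr
    have hmem : ls[j.toNat]'(by omega) ∈ (ls.drop (i + 1)).take 3 := by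
      rw [List.mem_iff_getElem]
      refine ⟨j.toNat - (i + 1), ?_, ?_⟩
      · simp; omega
      · rw [List.getElem_take, List.getElem_drop]
        congr 1; omega
    have hcl := hr _ hmem
    rw [PySem.List.pyGetD_eq_getElem ls "" (by omega) hlt]
    simpa [pvClose] using hcl

theorem pvSpec_getElem (ls : List String) (n : Nat) (hn : n < ls.length) :
    (pvSpec ls)[n]'(by rw [pvSpec_length]; exact hn) = pvDec ls[n] (ls.drop (n + 1)) := by
  induction ls generalizing n with
  | nil => simp at hn
  | cons l t ih =>
    cases n with
    | zero => simp [pvSpec]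
    | succ m => simpa [pvSpec] using ih m (by simpa using hn)

/-- A's fold invariant: after the first `i` indices, the prefix is decided and the
suffix is untouched. -/
theorem pvA_inv (lines : List String) (i : Nat) (hi : i ≤ lines.length) :
    (List.range i).foldl (fun (ls : List String) (k : Nat) =>
      let line := ls.getD k ""
      if PySem.Str.isIn "<!--" line && !(PySem.Str.isIn "-->" line) then
        let found_close :=
          (PySem.List.pyRange ((k : Int) + 1) (min ((k : Int) + 4) (ls.length : Int)) 1).any
            (fun j => PySem.Str.isIn "-->" (PySem.List.pyGetD ls j ""))
        if !found_close then PySem.List.pySetD ls (k : Int) (line ++ " -->") else ls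
      else ls) lines
    = (pvSpec lines).take i ++ lines.drop i := by
  induction i with
  | zero => simp
  | succ n ih =>
    have hn : n < lines.length := hi
    rw [List.range_succ, List.foldl_append, ih (le_of_lt hn)]
    simp only [List.foldl_cons, List.foldl_nil]
    set st := (pvSpec lines).take n ++ lines.drop n with hst
    have hlenp : ((pvSpec lines).take n).length = n := by
      simp [pvSpec_length]; omega
    have hlen : st.length = lines.length := by
      simp [hst, pvSpec_length]; omega
    have hline : st.getD n "" = lines[n] := by
      rw [hst, List.getD_eq_getElem?_getD, List.getElem?_append_right (by omega), hlenp]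
      simp [hn]
    have hdrop : st.drop (n + 1) = lines.drop (n + 1) := by
      rw [hst, List.drop_append, List.drop_of_length_le (by omega), List.nil_append,
        List.drop_drop, hlenp]
      congr 1
      omega
    have hspecn := pvSpec_getElem lines n hn
    have htake : (pvSpec lines).take (n + 1)
        = (pvSpec lines).take n ++ [pvDec lines[n] (lines.drop (n + 1))] := by
      rw [List.take_add_one]
      congr 1
      rw [List.getElem?_eq_getElem (by rw [pvSpec_length]; exact hn), hspecn]
      rfl
    have hdropn : lines.drop n = lines[n] :: lines.drop (n + 1) :=
      List.drop_eq_getElem_cons hn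
    simp only [hline]
    by_cases ho : (PySem.Str.isIn "<!--" lines[n] && !(PySem.Str.isIn "-->" lines[n])) = true
    · simp only [ho, if_pos]
      rw [pvRange_any st n, hdrop]
      by_cases hf : ((lines.drop (n + 1)).take 3).any pvClose = true
      · simp only [hf, Bool.not_true, Bool.false_eq_true, if_false]
        rw [hst, htake, hdropn]
        have hd : pvDec lines[n] (lines.drop (n + 1)) = lines[n] := by
          simp [pvDec, hf]
        rw [hd]; simp
      · simp only [Bool.not_eq_true] at hf
        simp only [hf, Bool.not_false]
        rw [PySem.List.pySetD_natCast]
        rw [hst, hdropn, htake]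
        have hset : (((pvSpec lines).take n) ++ lines[n] :: lines.drop (n + 1)).set n (lines[n] ++ " -->")
            = ((pvSpec lines).take n) ++ (lines[n] ++ " -->") :: lines.drop (n + 1) := by
          rw [List.set_append_right _ _ (by omega), hlenp]
          simp only [Nat.sub_self, List.set_cons_zero]
        rw [hset]
        have hd : pvDec lines[n] (lines.drop (n + 1)) = lines[n] ++ " -->" := by
          simp only [pvDec, pvOpen, pvClose, hf, Bool.not_false, Bool.and_true, ho]
          simp
        rw [hd]; simp
    · rw [if_neg ho]
      rw [hst, htake, hdropn]
      have ho' : (PySem.Str.isIn "<!--" lines[n] && !(PySem.Str.isIn "-->" lines[n])) = false := by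
        simpa using ho
      have hd : pvDec lines[n] (lines.drop (n + 1)) = lines[n] := by
        unfold pvDec pvOpen pvClose
        rw [ho']
        simp
      rw [hd]; simp

/-- B's fold invariant. -/
theorem pvB_inv (s : List String) :
    s.reverse.foldl (fun (acc : List String × Option Int) line =>
      let out :=
        if PySem.Str.isIn "<!--" line && !(PySem.Str.isIn "-->" line) &&
            (match acc.2 with | none => true | some d => decide (3 < d)) then
          acc.1 ++ [line ++ " -->"]
        else
          acc.1 ++ [line]
      let dist : Option Int :=
        if PySem.Str.isIn "-->" line then some 1
        else match acc.2 with | none => none | some d => some (d + 1)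
      (out, dist)) (([] : List String), (none : Option Int))
    = ((pvSpec s).reverse, pvDist s) := by
  induction s with
  | nil => rfl
  | cons l t ih =>
    rw [List.reverse_cons, List.foldl_append, ih]
    simp only [List.foldl_cons, List.foldl_nil]
    show ((if PySem.Str.isIn "<!--" l && !(PySem.Str.isIn "-->" l) &&
            (match pvDist t with | none => true | some d => decide (3 < d)) then
          (pvSpec t).reverse ++ [l ++ " -->"]
        else (pvSpec t).reverse ++ [l]),
        (if PySem.Str.isIn "-->" l then some (1 : Int)
         else match pvDist t with | none => none | some d => some (d + 1)))
      = ((pvSpec (l :: t)).reverse, pvDist (l :: t))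
    have hw : (match pvDist t with | none => true | some d => decide ((3 : Int) < d)) =
        !((t.take 3).any pvClose) := by
      simpa using pvDist_window t 3
    refine Prod.ext_iff.mpr ⟨?_, ?_⟩
    · rw [hw]
      simp only [pvSpec, List.reverse_cons]
      unfold pvDec pvOpen pvClose
      cases hcond : (PySem.Str.isIn "<!--" l && !PySem.Str.isIn "-->" l &&
          !(t.take 3).any fun l => PySem.Str.isIn "-->" l) <;> simp
    · rfl

-- ===== VERDICT (by name: the statement is the Claim_ definition above) =====
theorem fix_unclosed_comments_py_spec : Claim_equal_fix_unclosed_comments_py := by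
  intro text _
  show fix_unclosed_comments_py text = fix_unclosed_comments_py_alt text
  simp only [fix_unclosed_comments_py, fix_unclosed_comments_py_alt]
  rw [pvA_inv _ _ le_rfl, pvB_inv]
  simp only [List.drop_length, List.append_nil, List.reverse_reverse]
  congr 1
  exact List.take_of_length_le (by rw [pvSpec_length])
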